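-- pv_equiv track=rewrite | github.com/ferhatcamgoz/rest-api-for-modsec-crs | api.py | extract_modsecurity_logs
-- ===== SOURCE A (Python) =====
-- def extract_modsecurity_logs(log_content, unique_id):
--     relevant_logs = []
--     logs = log_content.split('\n')
--     inside_relevant_block = False
--     for line in logs:
--         if unique_id in line:
--             inside_relevant_block = True
--         if inside_relevant_block:
--             relevant_logs.append(line)
--         if inside_relevant_block and 'end of audit log' in line.lower():
--             break
--     return '\n'.join(relevant_logs)
-- ===== SOURCE B (Python) =====
-- def extract_modsecurity_logs(log_content, unique_id):
--     pos = log_content.find(unique_id)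
--     if pos == -1:
--         return ''
--     start = log_content.rfind('\n', 0, pos) + 1
--     mpos = log_content.lower().find('end of audit log', start)
--     if mpos == -1:
--         return log_content[start:]
--     end = log_content.find('\n', mpos)
--     if end == -1:
--         return log_content[start:]
--     return log_content[start:end]
-- ===== Notes on version B (the rewrite author's own statement) =====
-- stated objective: alternative
-- what changed: B never builds a line list: it locates unique_id with find, rewinds to the line start with rfind, searches the lowercased string for the end marker from there and returns one slice, instead of A's split(' ') plus flag/break accumulation loop joined back together.
-- outside the precondition, e.g. on extract_modsecurity_logs('a\nb', 'a\nb'): A returns '', B returns 'a\nb'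
import Mathlib
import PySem

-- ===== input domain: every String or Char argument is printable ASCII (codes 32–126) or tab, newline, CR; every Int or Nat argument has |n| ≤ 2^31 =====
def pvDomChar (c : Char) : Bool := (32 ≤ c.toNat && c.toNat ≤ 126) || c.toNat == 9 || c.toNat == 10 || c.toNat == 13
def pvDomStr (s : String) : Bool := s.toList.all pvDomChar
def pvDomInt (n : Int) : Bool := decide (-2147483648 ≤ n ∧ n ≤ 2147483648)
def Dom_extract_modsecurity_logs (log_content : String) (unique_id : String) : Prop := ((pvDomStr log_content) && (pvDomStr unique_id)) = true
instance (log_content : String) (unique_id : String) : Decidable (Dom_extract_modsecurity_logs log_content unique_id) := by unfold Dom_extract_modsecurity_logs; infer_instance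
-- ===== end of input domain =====

-- B replaces A's line-splitting flag/break loop by index arithmetic on the raw string
-- (find / rfind / slicing); return values agree on every input whose unique_id has no newline.

-- ===== PORT A =====
-- the for-loop with its `inside_relevant_block` flag and `break`, as structural recursion
def pvALoop (uid : List Char) : List (List Char) → Bool → List (List Char)
  | [], _ => []
  | line :: rest, inside =>
    let inside' := inside || PySem.Chars.isIn uid line
    if inside' then
      if PySem.Chars.isIn "end of audit log".toList (PySem.Chars.lower line) then [line]
      else line :: pvALoop uid rest inside'
    else pvALoop uid rest inside'

def extract_modsecurity_logs (log_content : String) (unique_id : String) : String :=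
  -- log_content.split('\n'): the separator is non-empty, so split? never raises (getD is inert)
  let logs := (PySem.Chars.split? log_content.toList ['\n']).getD []
  String.ofList (PySem.Chars.join ['\n'] (pvALoop unique_id.toList logs false))

-- ===== PORT B =====
def extract_modsecurity_logs_alt (log_content : String) (unique_id : String) : String :=
  let s := log_content.toList
  let pos := PySem.Chars.find s unique_id.toList
  if pos = -1 then ""
  else
    let start := PySem.Chars.rfindFrom s ['\n'] 0 (some pos) + 1
    let mpos := PySem.Chars.findFrom (PySem.Chars.lower s) "end of audit log".toList start
    if mpos = -1 then String.ofList (PySem.Chars.slice s (some start) none)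
    else
      let endp := PySem.Chars.findFrom s ['\n'] mpos
      if endp = -1 then String.ofList (PySem.Chars.slice s (some start) none)
      else String.ofList (PySem.Chars.slice s (some start) (some endp))

-- ===== PRECONDITION & SPEC =====
-- Pre_ excludes only unique_ids that contain a newline AND occur verbatim in log_content:
-- no single line can contain such an id (A returns ''), while B's raw-string search finds it
-- spanning a line boundary — a corner no caller of a log extractor would rely on.
def Pre_extract_modsecurity_logs (log_content : String) (unique_id : String) : Prop :=
  PySem.Str.isIn "\n" unique_id = false ∨ PySem.Str.isIn unique_id log_content = false
instance (log_content : String) (unique_id : String) : Decidable (Pre_extract_modsecurity_logs log_content unique_id) := by unfold Pre_extract_modsecurity_logs; infer_instance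

def pvWitness_extract_modsecurity_logs : String × String :=
  ("pre\n--id-7 hit\npayload\n--- END OF AUDIT LOG ---\ntail", "id-7")

def Spec_extract_modsecurity_logs (log_content : String) (unique_id : String) (out : String) : Prop := out = extract_modsecurity_logs_alt log_content unique_id
instance (log_content : String) (unique_id : String) (out : String) : Decidable (Spec_extract_modsecurity_logs log_content unique_id out) := by unfold Spec_extract_modsecurity_logs; infer_instance

-- ===== CLAIM (what is proved, stated in full; the proofs are below) =====
def Claim_equal_extract_modsecurity_logs : Prop := ∀ (log_content : String) (unique_id : String), Dom_extract_modsecurity_logs log_content unique_id → Pre_extract_modsecurity_logs log_content unique_id → Spec_extract_modsecurity_logs log_content unique_id (extract_modsecurity_logs log_content unique_id)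

-- ===== LEMMAS AND PROOFS =====

def pvSplit : List Char → List (List Char)
  | [] => [[]]
  | c :: r =>
    if c = '\n' then [] :: pvSplit r
    else
      match pvSplit r with
      | [] => [[c]]
      | x :: xs => (c :: x) :: xs

lemma pvSplit_ne_nil (t : List Char) : pvSplit t ≠ [] := by
  cases t with
  | nil => simp [pvSplit]
  | cons c r =>
    simp only [pvSplit]
    split
    · simp
    · split <;> simp

lemma pvSplit_no_nl {t : List Char} (h : '\n' ∉ t) : pvSplit t = [t] := by
  induction t with
  | nil => rfl
  | cons c r ih =>
    simp only [List.mem_cons, not_or] at h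
    have hc : ¬ c = '\n' := fun hc => h.1 hc.symm
    simp only [pvSplit, if_neg hc, ih h.2]

lemma pvSplit_append (a b : List Char) : pvSplit (a ++ '\n' :: b) = pvSplit a ++ pvSplit b := by
  induction a with
  | nil => simp [pvSplit]
  | cons c r ih =>
    by_cases hc : c = '\n'
    · subst hc; simp [pvSplit, ih]
    · simp only [List.cons_append, pvSplit, if_neg hc, ih]
      have h1 := pvSplit_ne_nil r
      cases hr : pvSplit r with
      | nil => exact absurd hr h1
      | cons x xs => simp

lemma pvExists_split {t : List Char} (h : '\n' ∈ t) :
    ∃ a b, t = a ++ '\n' :: b ∧ '\n' ∉ a := by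
  induction t with
  | nil => simp at h
  | cons c r ih =>
    by_cases hc : c = '\n'
    · exact ⟨[], r, by simp [hc], by simp⟩
    · have hr : '\n' ∈ r := by
        rcases List.mem_cons.1 h with h | h
        · exact absurd h.symm hc
        · exact h
      obtain ⟨a, b, rfl, hna⟩ := ih hr
      exact ⟨c :: a, b, rfl, by simp [hna]; exact fun hh => hc (Eq.symm hh)⟩

lemma pvMem_pvSplit_infix {t l : List Char} (h : l ∈ pvSplit t) : l <:+: t := by
  by_cases hm : '\n' ∈ t
  · obtain ⟨a, b, ht, hna⟩ := pvExists_split hm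
    rw [ht, pvSplit_append, pvSplit_no_nl hna] at h
    rcases List.mem_append.1 h with h | h
    · rw [List.mem_singleton.1 h, ht]
      exact ⟨[], '\n' :: b, by simp⟩
    · rw [ht]
      exact (pvMem_pvSplit_infix h).trans ⟨a ++ ['\n'], [], by simp⟩
  · rw [pvSplit_no_nl hm] at h
    exact (List.mem_singleton.1 h) ▸ List.infix_refl t
termination_by t.length
decreasing_by subst ht; simp only [List.length_append, List.length_cons]; omega

lemma pvGo (fuel : Nat) : ∀ (l cur : List Char) (acc : List (List Char)), l.length < fuel →
    PySem.Chars.splitOn.go ['\n'] fuel l cur acc =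
      acc.reverse ++ (match pvSplit l with
        | [] => [cur.reverse]
        | x :: xs => (cur.reverse ++ x) :: xs) := by
  induction fuel with
  | zero => intro l cur acc h; omega
  | succ n ih =>
    intro l cur acc h
    cases l with
    | nil => simp [PySem.Chars.splitOn.go, pvSplit]
    | cons c rest =>
      by_cases hc : c = '\n'
      · subst hc
        rw [show PySem.Chars.splitOn.go ['\n'] (n+1) ('\n' :: rest) cur acc =
              PySem.Chars.splitOn.go ['\n'] n rest [] (cur.reverse :: acc) by
          simp [PySem.Chars.splitOn.go, List.isPrefixOf]]
        rw [ih rest [] (cur.reverse :: acc) (by simp at h; omega)]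
        simp only [pvSplit, reduceIte]
        cases hr : pvSplit rest with
        | nil => exact absurd hr (pvSplit_ne_nil rest)
        | cons x xs => simp
      · rw [show PySem.Chars.splitOn.go ['\n'] (n+1) (c :: rest) cur acc =
              PySem.Chars.splitOn.go ['\n'] n rest (c :: cur) acc by
          simp [PySem.Chars.splitOn.go, List.isPrefixOf]
          intro hh; exact absurd (Eq.symm hh) hc]
        rw [ih rest (c :: cur) acc (by simp at h; omega)]
        simp only [pvSplit, if_neg hc]
        cases hr : pvSplit rest with
        | nil => exact absurd hr (pvSplit_ne_nil rest)
        | cons x xs => simp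

lemma pvSplitOn_eq (t : List Char) : PySem.Chars.splitOn t ['\n'] = pvSplit t := by
  rw [PySem.Chars.splitOn, pvGo (t.length + 1) t [] [] (by omega)]
  cases hr : pvSplit t with
  | nil => exact absurd hr (pvSplit_ne_nil t)
  | cons x xs => simp

lemma pvNl_prefix_iff (s : List Char) (i : Nat) :
    ['\n'] <+: s.drop i ↔ s[i]? = some '\n' := by
  rw [← List.head?_drop]
  cases hd : s.drop i with
  | nil => simp
  | cons a t => simp [List.cons_prefix_cons, eq_comm]

lemma pvRfind_spec (s : List Char) (k : Nat) :
    (PySem.Chars.rfind.go s ['\n'] k = -1 ∧ ∀ i ≤ k, ¬ ['\n'] <+: s.drop i) ∨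
    (∃ j ≤ k, PySem.Chars.rfind.go s ['\n'] k = (j : Int) ∧ ['\n'] <+: s.drop j ∧
      ∀ i, j < i → i ≤ k → ¬ ['\n'] <+: s.drop i) := by
  induction k with
  | zero =>
    by_cases h : ['\n'].isPrefixOf s
    · right
      refine ⟨0, le_refl 0, ?_, ?_, ?_⟩
      · simp [PySem.Chars.rfind.go, h]
      · simpa [List.isPrefixOf_iff_prefix] using h
      · omega
    · left
      constructor
      · simp [PySem.Chars.rfind.go, h]
      · intro i hi
        interval_cases i
        simpa [List.isPrefixOf_iff_prefix] using h
  | succ n ih =>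
    by_cases h : ['\n'].isPrefixOf (s.drop (n+1))
    · right
      refine ⟨n+1, le_refl _, ?_, ?_, ?_⟩
      · simp [PySem.Chars.rfind.go, h]
      · simpa [List.isPrefixOf_iff_prefix] using h
      · omega
    · have hgo : PySem.Chars.rfind.go s ['\n'] (n+1) = PySem.Chars.rfind.go s ['\n'] n := by
        simp [PySem.Chars.rfind.go, h]
      have hnp : ¬ ['\n'] <+: s.drop (n+1) := by
        simpa [List.isPrefixOf_iff_prefix] using h
      rcases ih with ⟨h1, h2⟩ | ⟨j, hj, h1, h2, h3⟩
      · left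
        refine ⟨hgo ▸ h1, fun i hi => ?_⟩
        rcases Nat.lt_or_ge i (n+1) with hi' | hi'
        · exact h2 i (by omega)
        · have : i = n+1 := by omega
          exact this ▸ hnp
      · right
        refine ⟨j, by omega, hgo ▸ h1, h2, fun i hlt hle => ?_⟩
        rcases Nat.lt_or_ge i (n+1) with hi' | hi'
        · exact h3 i hlt (by omega)
        · have : i = n+1 := by omega
          exact this ▸ hnp

lemma pvFind_eq_of {s sub : List Char} {k : Nat} (h1 : sub <+: s.drop k)
    (h2 : ∀ i < k, ¬ sub <+: s.drop i) : PySem.Chars.find s sub = (k : Int) := by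
  have hinf : sub <:+: s := h1.isInfix.trans (List.drop_suffix k s).isInfix
  have h0 : 0 ≤ PySem.Chars.find s sub := (PySem.Chars.find_nonneg_iff s sub).2 hinf
  obtain ⟨hp, hmin⟩ := PySem.Chars.find_spec h0
  have : (PySem.Chars.find s sub).toNat = k := by
    rcases Nat.lt_trichotomy (PySem.Chars.find s sub).toNat k with h | h | h
    · exact absurd hp (h2 _ h)
    · exact h
    · exact absurd h1 (hmin k h)
  omega

lemma pvPrefix_mono_drop {u s : List Char} {q k : Nat} (h : u <+: (s.take k).drop q) :
    u <+: s.drop q :=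
  h.trans ((List.take_prefix k s).drop q)

lemma pvPrefix_restrict {u s : List Char} {q k : Nat} (h : u <+: s.drop q)
    (hk : q + u.length ≤ k) : u <+: (s.take k).drop q := by
  rw [List.drop_take]
  exact List.prefix_take_iff.2 ⟨h, by omega⟩

lemma pvCross {u l r : List Char} {i : Nat} (hu : '\n' ∉ u)
    (h : u <+: (l ++ '\n' :: r).drop i) (h1 : i ≤ l.length) (h2 : l.length < i + u.length) :
    False := by
  have hj : l.length - i < u.length := by omega
  have h3 := h.getElem hj
  rw [List.getElem_drop] at h3
  have hval : (l ++ '\n' :: r)[i + (l.length - i)]'(by simp; omega) = '\n' := by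
    have he : i + (l.length - i) = l.length := by omega
    simp [he]
  have h4 : u[l.length - i]'hj = '\n' := by rw [h3, hval]
  exact hu (h4 ▸ List.getElem_mem hj)

lemma pvOcc_cases {u l r : List Char} {i : Nat} (hu : '\n' ∉ u) (_hne : u ≠ [])
    (h : u <+: (l ++ '\n' :: r).drop i) :
    (i + u.length ≤ l.length ∧ u <+: l.drop i) ∨
    (l.length + 1 ≤ i ∧ u <+: r.drop (i - (l.length + 1))) := by
  rcases Nat.lt_or_ge l.length i with hi | hi
  · right
    obtain ⟨j, rfl⟩ : ∃ j, i = l.length + 1 + j := ⟨i - (l.length + 1), by omega⟩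
    refine ⟨by omega, ?_⟩
    have he : (l ++ '\n' :: r).drop (l.length + 1 + j) = r.drop j := by
      have h1 : l ++ '\n' :: r = (l ++ ['\n']) ++ r := by simp
      rw [h1, show l.length + 1 + j = (l ++ ['\n']).length + j by simp, List.drop_length_add_append]
    rw [he] at h
    have hj : l.length + 1 + j - (l.length + 1) = j := by omega
    rw [hj]
    exact h
  · rcases Nat.lt_or_ge l.length (i + u.length) with h2 | h2
    · exact absurd (pvCross hu h hi h2) (fun f => f)
    · left
      refine ⟨by omega, ?_⟩
      rw [List.drop_append_of_le_length hi] at h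
      have htake : u <+: (l.drop i ++ '\n' :: r).take (l.length - i) := by
        rw [List.prefix_take_iff]
        refine ⟨h, by omega⟩
      rw [List.take_append_of_le_length (by rw [List.length_drop]),
        List.take_of_length_le (by rw [List.length_drop])] at htake
      exact htake

lemma pvOcc_left {u l : List Char} (X : List Char) {i : Nat} (h : u <+: l.drop i) :
    u <+: (l ++ X).drop i := by
  rcases Nat.lt_or_ge i l.length with hi | hi
  · rw [List.drop_append_of_le_length (by omega)]
    exact h.trans ((l.drop i).prefix_append X)
  · have hd : l.drop i = [] := List.drop_eq_nil_of_le hi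
    rw [hd] at h
    have := List.prefix_nil.1 h
    simp [this]

lemma pvOcc_right {u r : List Char} (l : List Char) {j : Nat} (h : u <+: r.drop j) :
    u <+: (l ++ '\n' :: r).drop (l.length + 1 + j) := by
  have : l ++ '\n' :: r = (l ++ ['\n']) ++ r := by simp
  rw [this]
  have hlen : l.length + 1 + j = (l ++ ['\n']).length + j := by simp
  rw [hlen, List.drop_length_add_append]
  exact h

lemma pvFind_nl (a b : List Char) (h : '\n' ∉ a) :
    PySem.Chars.find (a ++ '\n' :: b) ['\n'] = (a.length : Int) := by
  apply pvFind_eq_of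
  · rw [List.drop_append_of_le_length (le_refl _), List.drop_of_length_le (le_refl _)]
    simp
  · intro i hi hp
    rw [pvNl_prefix_iff, List.getElem?_append_left hi] at hp
    exact h (List.mem_of_getElem? hp)

lemma pvFind_append_left {u l : List Char} (hu : '\n' ∉ u) (hl : u <:+: l) (r : List Char) :
    PySem.Chars.find (l ++ '\n' :: r) u = PySem.Chars.find l u := by
  have h0 : 0 ≤ PySem.Chars.find l u := (PySem.Chars.find_nonneg_iff l u).2 hl
  obtain ⟨hp, hmin⟩ := PySem.Chars.find_spec h0
  rw [pvFind_eq_of (k := (PySem.Chars.find l u).toNat) (pvOcc_left _ hp) ?_]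
  · omega
  · intro i hi hpre
    by_cases hne : u = []
    · subst hne; simp at hi
    rcases pvOcc_cases hu hne hpre with ⟨h1, h2⟩ | ⟨h1, h2⟩
    · exact hmin i hi h2
    · have : (PySem.Chars.find l u).toNat ≤ l.length := by
        have := PySem.Chars.find_le_length l u
        omega
      omega

lemma pvFind_append_right {u l : List Char} (hu : '\n' ∉ u) (hl : ¬ u <:+: l) (r : List Char) :
    PySem.Chars.find (l ++ '\n' :: r) u =
      (if u <:+: r then (l.length : Int) + 1 + PySem.Chars.find r u else -1) := by
  have hne : u ≠ [] := by
    intro h; subst h; exact hl List.nil_infix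
  have hnol : ∀ i, ¬ u <+: l.drop i := by
    intro i hp
    exact hl (hp.isInfix.trans (List.drop_suffix i l).isInfix)
  split
  · rename_i hr
    have h0 : 0 ≤ PySem.Chars.find r u := (PySem.Chars.find_nonneg_iff r u).2 hr
    obtain ⟨hp, hmin⟩ := PySem.Chars.find_spec h0
    have := pvOcc_right (u := u) l hp
    rw [pvFind_eq_of (k := l.length + 1 + (PySem.Chars.find r u).toNat) this ?_]
    · push_cast; omega
    · intro i hi hpre
      rcases pvOcc_cases hu hne hpre with ⟨h1, h2⟩ | ⟨h1, h2⟩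
      · exact hnol i h2
      · exact hmin _ (by omega) h2
  · rename_i hr
    rw [PySem.Chars.find_eq_neg_one_iff]
    intro hinf
    obtain ⟨i, hp⟩ := (PySem.Chars.exists_prefix_drop_iff_isIn u (l ++ '\n' :: r)).2
      ((PySem.Chars.isIn_iff_infix _ _).2 hinf)
    rcases pvOcc_cases hu hne hp with ⟨h1, h2⟩ | ⟨h1, h2⟩
    · exact hnol i h2
    · exact hr (h2.isInfix.trans (List.drop_suffix _ r).isInfix)

lemma pvLower_append (a b : List Char) :
    PySem.Chars.lower (a ++ b) = PySem.Chars.lower a ++ PySem.Chars.lower b := by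
  simp [PySem.Chars.lower]

lemma pvLower_cons_nl (b : List Char) :
    PySem.Chars.lower ('\n' :: b) = '\n' :: PySem.Chars.lower b := by
  simp [PySem.Chars.lower]
  rfl

def pvMk : List Char := "end of audit log".toList

def pvCollect : List (List Char) → List (List Char)
  | [] => []
  | x :: xs => if PySem.Chars.isIn pvMk (PySem.Chars.lower x) then [x] else x :: pvCollect xs

lemma pvALoop_true (u : List Char) (L : List (List Char)) : pvALoop u L true = pvCollect L := by
  induction L with
  | nil => rfl
  | cons x xs ih => simp [pvALoop, pvCollect, pvMk, ih]

lemma pvALoop_nil_of_all (u : List Char) {L : List (List Char)}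
    (hP : ∀ x ∈ L, PySem.Chars.isIn u x = false) : pvALoop u L false = [] := by
  induction L with
  | nil => rfl
  | cons x xs ih =>
    have hx := hP x List.mem_cons_self
    simp [pvALoop, hx]
    exact ih (fun y hy => hP y (List.mem_cons_of_mem _ hy))

lemma pvALoop_skip_append (u : List Char) {P : List (List Char)}
    (hP : ∀ x ∈ P, PySem.Chars.isIn u x = false) (L : List (List Char)) :
    pvALoop u (P ++ L) false = pvALoop u L false := by
  induction P with
  | nil => rfl
  | cons x xs ih =>
    have hx := hP x List.mem_cons_self
    simp [pvALoop, hx]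
    exact ih (fun y hy => hP y (List.mem_cons_of_mem _ hy))

lemma pvALoop_hit (u x : List Char) (xs : List (List Char))
    (h : PySem.Chars.isIn u x = true) : pvALoop u (x :: xs) false = pvCollect (x :: xs) := by
  simp [pvALoop, h, pvCollect, pvMk, pvALoop_true]

def pvCut (t : List Char) : List Char :=
  let m := PySem.Chars.find (PySem.Chars.lower t) pvMk
  if m = -1 then t
  else
    let d := PySem.Chars.find (t.drop m.toNat) ['\n']
    if d = -1 then t else t.take (m.toNat + d.toNat)

lemma pvLower_length (t : List Char) : (PySem.Chars.lower t).length = t.length := by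
  simp [PySem.Chars.lower]

lemma pvT2 (t : List Char) :
    PySem.Chars.join ['\n'] (pvCollect (pvSplit t)) = pvCut t := by
  by_cases hm : '\n' ∈ t
  · obtain ⟨l, r, ht, hnl⟩ := pvExists_split hm
    rw [ht, pvSplit_append, pvSplit_no_nl hnl]
    have hlow : PySem.Chars.lower (l ++ '\n' :: r)
        = PySem.Chars.lower l ++ '\n' :: PySem.Chars.lower r := by
      rw [pvLower_append, pvLower_cons_nl]
    by_cases hml : pvMk <:+: PySem.Chars.lower l
    · have hIsIn : PySem.Chars.isIn pvMk (PySem.Chars.lower l) = true :=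
        (PySem.Chars.isIn_iff_infix _ _).2 hml
      have hL : pvCollect ([l] ++ pvSplit r) = [l] := by
        simp [pvCollect, hIsIn]
      rw [hL, PySem.Chars.join_singleton]
      unfold pvCut
      rw [hlow, pvFind_append_left (by decide) hml (PySem.Chars.lower r)]
      have hm0 : 0 ≤ PySem.Chars.find (PySem.Chars.lower l) pvMk :=
        (PySem.Chars.find_nonneg_iff _ _).2 hml
      obtain ⟨hp, _⟩ := PySem.Chars.find_spec hm0
      have hmne : ¬ PySem.Chars.find (PySem.Chars.lower l) pvMk = -1 := by omega
      rw [if_neg hmne]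
      have hmlen : (PySem.Chars.find (PySem.Chars.lower l) pvMk).toNat + pvMk.length ≤ l.length := by
        have h1 := hp.length_le
        rw [List.length_drop, pvLower_length] at h1
        have h2 := PySem.Chars.find_le_length (PySem.Chars.lower l) pvMk
        rw [pvLower_length] at h2
        have h3 : pvMk.length = 16 := by decide
        omega
      have hmk16 : 0 < pvMk.length := by decide
      rw [List.drop_append_of_le_length (by omega)]
      rw [pvFind_nl _ _ (fun hx => hnl (List.mem_of_mem_drop hx))]
      have hdne : ¬ ((l.drop (PySem.Chars.find (PySem.Chars.lower l) pvMk).toNat).length : Int) = -1 := by omega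
      rw [if_neg hdne]
      have he : (PySem.Chars.find (PySem.Chars.lower l) pvMk).toNat +
          ((l.drop (PySem.Chars.find (PySem.Chars.lower l) pvMk).toNat).length : Int).toNat = l.length := by
        rw [List.length_drop]; omega
      rw [he, List.take_left]
    · have hIsIn : PySem.Chars.isIn pvMk (PySem.Chars.lower l) = false :=
        (PySem.Chars.isIn_eq_false_iff _ _).2 hml
      have hL : pvCollect ([l] ++ pvSplit r) = l :: pvCollect (pvSplit r) := by
        simp [pvCollect, hIsIn]
      rw [hL]
      have hne : pvCollect (pvSplit r) ≠ [] := by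
        cases hs : pvSplit r with
        | nil => exact absurd hs (pvSplit_ne_nil r)
        | cons x xs =>
          simp only [pvCollect]
          split <;> simp
      obtain ⟨y, ys, hys⟩ := List.exists_cons_of_ne_nil hne
      rw [hys, PySem.Chars.join_cons_cons, ← hys, pvT2 r]
      unfold pvCut
      rw [hlow, pvFind_append_right (by decide) hml (PySem.Chars.lower r)]
      by_cases hmr : pvMk <:+: PySem.Chars.lower r
      · rw [if_pos hmr]
        have hm0 : 0 ≤ PySem.Chars.find (PySem.Chars.lower r) pvMk :=
          (PySem.Chars.find_nonneg_iff _ _).2 hmr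
        have hmrne : ¬ PySem.Chars.find (PySem.Chars.lower r) pvMk = -1 := by omega
        have houter : ¬ ((PySem.Chars.lower l).length : Int) + 1 +
            PySem.Chars.find (PySem.Chars.lower r) pvMk = -1 := by omega
        rw [if_neg houter, if_neg hmrne]
        have hll := pvLower_length l
        have htn : (((PySem.Chars.lower l).length : Int) + 1 +
            PySem.Chars.find (PySem.Chars.lower r) pvMk).toNat =
            l.length + 1 + (PySem.Chars.find (PySem.Chars.lower r) pvMk).toNat := by
          omega
        have hdrop : (l ++ '\n' :: r).drop (((PySem.Chars.lower l).length : Int) + 1 +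
            PySem.Chars.find (PySem.Chars.lower r) pvMk).toNat =
            r.drop (PySem.Chars.find (PySem.Chars.lower r) pvMk).toNat := by
          rw [htn, show l ++ '\n' :: r = (l ++ ['\n']) ++ r by simp,
            show l.length + 1 + (PySem.Chars.find (PySem.Chars.lower r) pvMk).toNat
              = (l ++ ['\n']).length + (PySem.Chars.find (PySem.Chars.lower r) pvMk).toNat by simp,
            List.drop_length_add_append]
        rw [hdrop]
        by_cases hd : PySem.Chars.find
            (r.drop (PySem.Chars.find (PySem.Chars.lower r) pvMk).toNat) ['\n'] = -1
        · rw [if_pos hd, if_pos hd]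
          simp
        · rw [if_neg hd, if_neg hd]
          have hd0 : 0 ≤ PySem.Chars.find
              (r.drop (PySem.Chars.find (PySem.Chars.lower r) pvMk).toNat) ['\n'] := by
            have := PySem.Chars.neg_one_le_find
              (r.drop (PySem.Chars.find (PySem.Chars.lower r) pvMk).toNat) ['\n']
            omega
          have hidx : (((PySem.Chars.lower l).length : Int) + 1 +
              PySem.Chars.find (PySem.Chars.lower r) pvMk).toNat +
              (PySem.Chars.find (r.drop (PySem.Chars.find (PySem.Chars.lower r) pvMk).toNat) ['\n']).toNat =
              (l ++ ['\n']).length + ((PySem.Chars.find (PySem.Chars.lower r) pvMk).toNat +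
                (PySem.Chars.find (r.drop (PySem.Chars.find (PySem.Chars.lower r) pvMk).toNat) ['\n']).toNat) := by
            simp; omega
          rw [show l ++ '\n' :: r = (l ++ ['\n']) ++ r by simp, hidx, List.take_length_add_append]
      · rw [if_neg hmr, if_pos rfl]
        have hcr : PySem.Chars.find (PySem.Chars.lower r) pvMk = -1 :=
          (PySem.Chars.find_eq_neg_one_iff _ _).2 hmr
        rw [if_pos hcr]
        simp
  · rw [pvSplit_no_nl hm]
    have hL : PySem.Chars.join ['\n'] (pvCollect [t]) = t := by
      simp only [pvCollect]
      split <;> simp [PySem.Chars.join_singleton]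
    rw [hL]
    unfold pvCut
    by_cases hml : PySem.Chars.find (PySem.Chars.lower t) pvMk = -1
    · rw [if_pos hml]
    · rw [if_neg hml]
      have hdn : PySem.Chars.find
          (t.drop (PySem.Chars.find (PySem.Chars.lower t) pvMk).toNat) ['\n'] = -1 := by
        rw [PySem.Chars.find_eq_neg_one_iff]
        intro hinf
        have : '\n' ∈ t.drop (PySem.Chars.find (PySem.Chars.lower t) pvMk).toNat :=
          (List.singleton_infix_iff _ _).1 hinf
        exact hm (List.mem_of_mem_drop this)
      rw [if_pos hdn]
termination_by t.length
decreasing_by subst ht; simp only [List.length_append, List.length_cons]; omega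

def pvB (s u : List Char) : List Char :=
  let pos := PySem.Chars.find s u
  if pos = -1 then []
  else
    let start := PySem.Chars.rfindFrom s ['\n'] 0 (some pos) + 1
    let mpos := PySem.Chars.findFrom (PySem.Chars.lower s) pvMk start
    if mpos = -1 then PySem.Chars.slice s (some start) none
    else
      let endp := PySem.Chars.findFrom s ['\n'] mpos
      if endp = -1 then PySem.Chars.slice s (some start) none
      else PySem.Chars.slice s (some start) (some endp)

lemma pvRfindFrom_red (s : List Char) {pos : Int} (h0 : 0 ≤ pos) (h1 : pos ≤ (s.length : Int)) :
    PySem.Chars.rfindFrom s ['\n'] 0 (some pos) = PySem.Chars.rfind (s.take pos.toNat) ['\n'] := by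
  rw [PySem.Chars.rfindFrom]
  simp only [show ¬ ((s.length : Int) < pos) from by omega, if_false,
    show ¬ pos < (0:Int) from by omega, if_false, lt_irrefl, Int.toNat_zero, List.drop_zero]
  split
  · rename_i hr
    omega
  · simp

lemma pvBF {s : List Char} {st : Nat} (hst : st ≤ s.length) :
    (let mpos := PySem.Chars.findFrom (PySem.Chars.lower s) pvMk (st : Int);
     if mpos = -1 then PySem.Chars.slice s (some (st : Int)) none
     else
       let endp := PySem.Chars.findFrom s ['\n'] mpos
       if endp = -1 then PySem.Chars.slice s (some (st : Int)) none
       else PySem.Chars.slice s (some (st : Int)) (some endp)) = pvCut (s.drop st) := by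
  have hld : (PySem.Chars.lower s).drop st = PySem.Chars.lower (s.drop st) := by
    simp [PySem.Chars.lower, List.map_drop]
  have hsl : PySem.Chars.slice s (some (st : Int)) none = s.drop st := by
    rw [PySem.Chars.slice_eq_listSlice, PySem.List.slice_from s (by omega : (0:Int) ≤ (st:Int))]
    simp
  rw [PySem.Chars.findFrom_natCast (PySem.Chars.lower s) pvMk st (by rw [pvLower_length]; omega), hld]
  set t := s.drop st with htdef
  set m := PySem.Chars.find (PySem.Chars.lower t) pvMk with hmdef
  by_cases hm : m = -1
  · rw [if_pos hm]
    simp only [reduceIte]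
    rw [hsl]
    unfold pvCut
    rw [← hmdef, if_pos hm]
  · rw [if_neg hm]
    have hm0 : 0 ≤ m := by
      have := PySem.Chars.neg_one_le_find (PySem.Chars.lower t) pvMk
      omega
    have hmle : m ≤ (t.length : Int) := by
      have := PySem.Chars.find_le_length (PySem.Chars.lower t) pvMk
      rwa [pvLower_length] at this
    have htlen : t.length = s.length - st := by rw [htdef, List.length_drop]
    have hcast : (st : Int) + m = ((st + m.toNat : Nat) : Int) := by omega
    have hne2 : ¬ ((st : Int) + m = -1) := by omega
    rw [if_neg hne2, hcast,
      PySem.Chars.findFrom_natCast s ['\n'] (st + m.toNat) (by omega)]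
    have hdd : s.drop (st + m.toNat) = t.drop m.toNat := by
      rw [htdef, List.drop_drop]
    rw [hdd]
    set d := PySem.Chars.find (t.drop m.toNat) ['\n'] with hddef
    by_cases hd : d = -1
    · rw [if_pos hd]
      simp only [reduceIte]
      rw [hsl]
      unfold pvCut
      rw [← hmdef, if_neg hm, ← hddef, if_pos hd]
    · rw [if_neg hd]
      have hd0 : 0 ≤ d := by
        have := PySem.Chars.neg_one_le_find (t.drop m.toNat) ['\n']
        omega
      have hne3 : ¬ (((st + m.toNat : Nat) : Int) + d = -1) := by omega
      rw [if_neg hne3]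
      have hcast2 : ((st + m.toNat : Nat) : Int) + d = ((st + m.toNat + d.toNat : Nat) : Int) := by
        omega
      rw [hcast2, PySem.Chars.slice_eq_listSlice, PySem.List.slice_natCast]
      unfold pvCut
      rw [← hmdef, if_neg hm, ← hddef, if_neg hd]
      have : st + m.toNat + d.toNat - st = m.toNat + d.toNat := by omega
      rw [this, htdef]

lemma pvACut {s u : List Char} (hu : '\n' ∉ u) {st p : Nat}
    (hocc : u <+: s.drop p) (hmin : ∀ i < p, ¬ u <+: s.drop i)
    (hstp : st ≤ p)
    (hnob : ∀ i, st ≤ i → i < p → ¬ ['\n'] <+: s.drop i)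
    (hdec : st = 0 ∨ (1 ≤ st ∧ s[st - 1]? = some '\n')) :
    pvALoop u (pvSplit s) false = pvCollect (pvSplit (s.drop st)) := by
  set t := s.drop st with htdef
  have hoccT : u <+: t.drop (p - st) := by
    rw [htdef, List.drop_drop, show st + (p - st) = p by omega]
    exact hocc
  have hfirst : ∀ lt M, pvSplit t = lt :: M → u <:+: lt := by
    intro lt M hsp
    by_cases hnt : '\n' ∈ t
    · obtain ⟨a, b, htab, hna⟩ := pvExists_split hnt
      rw [htab, pvSplit_append, pvSplit_no_nl hna] at hsp
      have hlt : lt = a := by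
        simpa using congrArg (fun L => L.head?) hsp.symm
      rw [hlt]
      have hqa : p - st ≤ a.length := by
        by_contra hq
        rw [Nat.not_le] at hq
        apply hnob (st + a.length) (by omega) (by omega)
        rw [← List.drop_drop, ← htdef, htab]
        rw [List.drop_append_of_le_length (le_refl _), List.drop_of_length_le (le_refl _)]
        simp
      by_cases hune : u = []
      · subst hune; exact List.nil_infix
      · rcases pvOcc_cases hu hune (htab ▸ hoccT) with ⟨h1, h2⟩ | ⟨h1, h2⟩
        · exact h2.isInfix.trans (List.drop_suffix _ a).isInfix
        · omega
    · rw [pvSplit_no_nl hnt] at hsp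
      have hlt : lt = t := by simpa using congrArg (fun L => L.head?) hsp.symm
      subst hlt
      exact hoccT.isInfix.trans (List.drop_suffix _ t).isInfix
  have hA : pvALoop u (pvSplit t) false = pvCollect (pvSplit t) := by
    cases hsp : pvSplit t with
    | nil => exact absurd hsp (pvSplit_ne_nil t)
    | cons lt M =>
      exact pvALoop_hit u lt M ((PySem.Chars.isIn_iff_infix _ _).2 (hfirst lt M hsp))
  rcases hdec with h0 | ⟨h1, h2⟩
  · subst h0
    rw [htdef, List.drop_zero] at hA ⊢
    exact hA
  · have hlt : st - 1 < s.length := by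
      by_contra hq
      rw [Nat.not_lt] at hq
      rw [List.getElem?_eq_none_iff.2 hq] at h2
      simp at h2
    have hval : s[st - 1]'hlt = '\n' := by
      have := List.getElem?_eq_some_iff.1 h2
      obtain ⟨h3, h4⟩ := this
      exact h4
    have hsdecomp : s = s.take (st - 1) ++ '\n' :: t := by
      conv_lhs => rw [← List.take_append_drop (st - 1) s]
      congr 1
      rw [htdef, ← hval, ← List.getElem_cons_drop hlt, show st - 1 + 1 = st by omega]
    have hskip : ∀ x ∈ pvSplit (s.take (st - 1)), PySem.Chars.isIn u x = false := by
      intro x hx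
      rw [PySem.Chars.isIn_eq_false_iff]
      intro hux
      have hune : u ≠ [] := by
        intro h
        subst h
        exact hmin 0 (by omega) (by simp)
      have huA : u <:+: s.take (st - 1) := hux.trans (pvMem_pvSplit_infix hx)
      obtain ⟨i, hi⟩ := (PySem.Chars.exists_prefix_drop_iff_isIn u (s.take (st - 1))).2
        ((PySem.Chars.isIn_iff_infix _ _).2 huA)
      have hu1 : 1 ≤ u.length := by
        cases u with
        | nil => exact absurd rfl hune
        | cons a l => simp
      have hb : i + u.length ≤ st - 1 := by
        have hl := hi.length_le
        rw [List.length_drop, List.length_take] at hl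
        omega
      exact hmin i (by omega) (pvPrefix_mono_drop hi)
    calc pvALoop u (pvSplit s) false
        = pvALoop u (pvSplit (s.take (st - 1)) ++ pvSplit t) false := by
          conv_lhs => rw [hsdecomp, pvSplit_append]
      _ = pvALoop u (pvSplit t) false := pvALoop_skip_append u hskip _
      _ = pvCollect (pvSplit t) := hA

lemma pvMain (s u : List Char) (hu : u <:+: s → '\n' ∉ u) :
    PySem.Chars.join ['\n'] (pvALoop u (pvSplit s) false) = pvB s u := by
  simp only [pvB]
  by_cases hin : u <:+: s
  · have hu : '\n' ∉ u := hu hin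
    have hp0 : 0 ≤ PySem.Chars.find s u := (PySem.Chars.find_nonneg_iff s u).2 hin
    have hfne : ¬ PySem.Chars.find s u = -1 := by omega
    rw [if_neg hfne]
    obtain ⟨hocc, hmin⟩ := PySem.Chars.find_spec hp0
    set p := (PySem.Chars.find s u).toNat with hpdef
    have hple : p ≤ s.length := by
      have := PySem.Chars.find_le_length s u
      omega
    have hposcast : PySem.Chars.find s u = (p : Int) := by omega
    rw [hposcast, pvRfindFrom_red s (by omega) (by omega), Int.toNat_natCast]
    have hrdef : PySem.Chars.rfind (s.take p) ['\n'] =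
        PySem.Chars.rfind.go (s.take p) ['\n'] (s.take p).length := rfl
    have hlentake : (s.take p).length = p := by
      rw [List.length_take]
      omega
    rcases pvRfind_spec (s.take p) (s.take p).length with ⟨hr1, hr2⟩ | ⟨j, hj, hr1, hr2, hr3⟩
    · -- no newline before the match: block starts at 0
      have hsteq : PySem.Chars.rfind (s.take p) ['\n'] + 1 = ((0 : Nat) : Int) := by
        rw [hrdef, hr1]
        decide
      rw [hsteq]
      have hnob : ∀ i, 0 ≤ i → i < p → ¬ ['\n'] <+: s.drop i := by
        intro i _ hip hpre
        exact hr2 i (by omega) (pvPrefix_restrict hpre (by simp; omega))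
      rw [pvACut hu hocc hmin (by omega) hnob (Or.inl rfl), pvT2]
      exact (pvBF (by omega)).symm
    · -- last newline before the match is at j
      have hjlt : j < p := by
        rw [pvNl_prefix_iff] at hr2
        have := List.getElem?_eq_some_iff.1 hr2
        obtain ⟨hjl, _⟩ := this
        omega
      have hsteq : PySem.Chars.rfind (s.take p) ['\n'] + 1 = ((j + 1 : Nat) : Int) := by
        rw [hrdef, hr1]
        push_cast
        ring
      rw [hsteq]
      have hnob : ∀ i, j + 1 ≤ i → i < p → ¬ ['\n'] <+: s.drop i := by
        intro i hji hip hpre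
        exact hr3 i (by omega) (by omega) (pvPrefix_restrict hpre (by simp; omega))
      have hjget : s[(j + 1) - 1]? = some '\n' := by
        rw [pvNl_prefix_iff] at hr2
        rw [show j + 1 - 1 = j by omega, ← List.getElem?_take_of_lt hjlt]
        exact hr2
      rw [pvACut hu hocc hmin (by omega) hnob (Or.inr ⟨by omega, hjget⟩), pvT2]
      exact (pvBF (by omega)).symm
  · rw [if_pos ((PySem.Chars.find_eq_neg_one_iff s u).2 hin)]
    rw [pvALoop_nil_of_all u (fun x hx => (PySem.Chars.isIn_eq_false_iff _ _).2
      (fun hux => hin (hux.trans (pvMem_pvSplit_infix hx)))), PySem.Chars.join_nil]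

lemma pvAlt_eq (log_content unique_id : String) :
    extract_modsecurity_logs_alt log_content unique_id =
      String.ofList (pvB log_content.toList unique_id.toList) := by
  simp only [extract_modsecurity_logs_alt, pvB, pvMk]
  split_ifs <;> rfl

-- ===== VERDICT (by name: the statement is the Claim_ definition above) =====
theorem extract_modsecurity_logs_spec : Claim_equal_extract_modsecurity_logs := by
  intro lc uid _ hpre
  unfold Spec_extract_modsecurity_logs
  rw [pvAlt_eq]
  unfold extract_modsecurity_logs
  have hu : uid.toList <:+: lc.toList → '\n' ∉ uid.toList := by
    intro hinf hm
    rcases hpre with hpre | hpre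
    · have hT : PySem.Str.isIn "\n" uid = true := by
        rw [PySem.Str.isIn_iff_infix]
        have he : ("\n" : String).toList = ['\n'] := by decide
        rw [he]
        exact (List.singleton_infix_iff _ _).2 hm
      rw [hpre] at hT
      exact Bool.noConfusion hT
    · have hT : PySem.Str.isIn uid lc = true := (PySem.Str.isIn_iff_infix _ _).2 hinf
      rw [hpre] at hT
      exact Bool.noConfusion hT
  have hsp : (PySem.Chars.split? lc.toList ['\n']).getD [] = pvSplit lc.toList := by
    rw [PySem.Chars.split?]
    simp [pvSplitOn_eq]
  rw [hsp]
  exact congrArg String.ofList (pvMain lc.toList uid.toList hu)
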